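-- pv_equiv track=rewrite | github.com/SnakeMistake/rosalind | stronghold/CONS/CONS.py | con_string
-- ===== SOURCE A (Python) =====
-- g_count =[]
--
-- c_count = []
--
-- a_count = []
--
-- t_count = []
--
-- def con_string(g_count, c_count, a_count, t_count):
--   strand = ""
--   for i in range(len(g_count)):
--     if g_count[i] >= c_count[i] and g_count[i] >= a_count[i] and g_count[i] >= t_count[i]:
--       strand += "G"
--     elif c_count[i] >= a_count[i] and c_count[i] >= t_count[i]:
--       strand += "C"
--     elif a_count[i] >= t_count[i]:
--       strand += "A"
--     else:
--       strand += "T"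
--   return strand
-- ===== SOURCE B (Python) =====
-- def con_string(g_count, c_count, a_count, t_count):
--     n = len(g_count)
--     strand = ['T'] * n
--     for i in range(n):
--         if a_count[i] >= t_count[i]:
--             strand[i] = 'A'
--     for i in range(n):
--         if c_count[i] >= a_count[i] and c_count[i] >= t_count[i]:
--             strand[i] = 'C'
--     for i in range(n):
--         if g_count[i] >= c_count[i] and g_count[i] >= a_count[i] and g_count[i] >= t_count[i]:
--             strand[i] = 'G'
--     return "".join(strand)
-- ===== Notes on version B (the rewrite author's own statement) =====
-- stated objective: alternative
-- what changed: Replaces the single-pass if/elif cascade that appends one letter per position by staged refinement: a list preset to 'T' is overwritten in three separate full passes (A-pass, C-pass, G-pass), so priority comes from overwrite order instead of branch order, and the chars are joined at the end.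
import Mathlib
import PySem

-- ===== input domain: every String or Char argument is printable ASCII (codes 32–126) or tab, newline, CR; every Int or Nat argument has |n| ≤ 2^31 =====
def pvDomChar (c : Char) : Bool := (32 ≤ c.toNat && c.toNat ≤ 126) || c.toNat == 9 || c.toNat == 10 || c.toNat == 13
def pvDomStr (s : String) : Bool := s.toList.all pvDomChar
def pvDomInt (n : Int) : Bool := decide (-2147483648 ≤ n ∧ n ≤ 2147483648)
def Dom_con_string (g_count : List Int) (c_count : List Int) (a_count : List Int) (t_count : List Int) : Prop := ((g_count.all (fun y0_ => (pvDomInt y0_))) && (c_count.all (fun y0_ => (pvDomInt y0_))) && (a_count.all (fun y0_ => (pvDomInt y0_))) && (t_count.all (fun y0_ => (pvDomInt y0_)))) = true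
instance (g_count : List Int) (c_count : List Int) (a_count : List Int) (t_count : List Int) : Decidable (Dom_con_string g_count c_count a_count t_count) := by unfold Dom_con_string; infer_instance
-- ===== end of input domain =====

-- B replaces A's single-pass if/elif cascade by staged refinement: a char list preset to
-- 'T' is overwritten in three separate full passes (A, then C, then G); same return value.

-- ===== PORT A =====
-- A: loop i over range(len(g_count)); if/elif cascade appends one of "GCAT" to strand.
-- List.getD i 0 equals Python's l[i] whenever i < l.length; Pre_ guarantees that, so the
-- default 0 is never reached on admitted inputs.
def con_string (g_count : List Int) (c_count : List Int) (a_count : List Int) (t_count : List Int) : String :=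
  String.mk ((List.range g_count.length).foldl (fun strand i =>
    if g_count.getD i 0 ≥ c_count.getD i 0 ∧ g_count.getD i 0 ≥ a_count.getD i 0 ∧ g_count.getD i 0 ≥ t_count.getD i 0 then
      strand ++ ['G']
    else if c_count.getD i 0 ≥ a_count.getD i 0 ∧ c_count.getD i 0 ≥ t_count.getD i 0 then
      strand ++ ['C']
    else if a_count.getD i 0 ≥ t_count.getD i 0 then
      strand ++ ['A']
    else
      strand ++ ['T']) [])

-- ===== PORT B =====
-- one Python pass 'for i in range(n): if P(i): strand[i] = v' over the mutable list
def pvPass (P : Nat → Bool) (v : Char) (n : Nat) (s : List Char) : List Char :=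
  (List.range n).foldl (fun l i => if P i then l.set i v else l) s

-- B: strand = ['T'] * n, then the A-pass, C-pass and G-pass overwrite it; join at the end.
def con_string_alt (g_count : List Int) (c_count : List Int) (a_count : List Int) (t_count : List Int) : String :=
  String.mk
    (pvPass (fun i => decide (g_count.getD i 0 ≥ c_count.getD i 0 ∧ g_count.getD i 0 ≥ a_count.getD i 0 ∧ g_count.getD i 0 ≥ t_count.getD i 0)) 'G' g_count.length
      (pvPass (fun i => decide (c_count.getD i 0 ≥ a_count.getD i 0 ∧ c_count.getD i 0 ≥ t_count.getD i 0)) 'C' g_count.length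
        (pvPass (fun i => decide (a_count.getD i 0 ≥ t_count.getD i 0)) 'A' g_count.length
          (List.replicate g_count.length 'T'))))

-- ===== PRECONDITION & SPEC =====
-- Pre_ excludes exactly the inputs where the Pythons raise IndexError: some of c/a/t shorter than g.
def Pre_con_string (g_count : List Int) (c_count : List Int) (a_count : List Int) (t_count : List Int) : Prop :=
  g_count.length ≤ c_count.length ∧ g_count.length ≤ a_count.length ∧ g_count.length ≤ t_count.length
instance (g_count : List Int) (c_count : List Int) (a_count : List Int) (t_count : List Int) : Decidable (Pre_con_string g_count c_count a_count t_count) := by unfold Pre_con_string; infer_instance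

def pvWitness_con_string : List Int × List Int × List Int × List Int :=
  ([5, 1, 0, 2], [2, 1, 3, 2], [1, 1, 3, 2], [0, 0, 0, 3])

def Spec_con_string (g_count : List Int) (c_count : List Int) (a_count : List Int) (t_count : List Int) (out : String) : Prop := out = con_string_alt g_count c_count a_count t_count
instance (g_count : List Int) (c_count : List Int) (a_count : List Int) (t_count : List Int) (out : String) : Decidable (Spec_con_string g_count c_count a_count t_count out) := by unfold Spec_con_string; infer_instance

-- ===== CLAIM (what is proved, stated in full; the proofs are below) =====
def Claim_equal_con_string : Prop := ∀ (g_count : List Int) (c_count : List Int) (a_count : List Int) (t_count : List Int), Dom_con_string g_count c_count a_count t_count → Pre_con_string g_count c_count a_count t_count → Spec_con_string g_count c_count a_count t_count (con_string g_count c_count a_count t_count)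

-- ===== LEMMAS AND PROOFS =====

-- the letter the cascade chooses at position i
def pvCasc (g c a t : List Int) (i : Nat) : Char :=
  if g.getD i 0 ≥ c.getD i 0 ∧ g.getD i 0 ≥ a.getD i 0 ∧ g.getD i 0 ≥ t.getD i 0 then 'G'
  else if c.getD i 0 ≥ a.getD i 0 ∧ c.getD i 0 ≥ t.getD i 0 then 'C'
  else if a.getD i 0 ≥ t.getD i 0 then 'A'
  else 'T'

-- A's append loop produces the cascade letters in order
lemma a_loop_eq (g c a t : List Int) (n : Nat) (acc : List Char) :
    (List.range n).foldl (fun strand i =>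
      if g.getD i 0 ≥ c.getD i 0 ∧ g.getD i 0 ≥ a.getD i 0 ∧ g.getD i 0 ≥ t.getD i 0 then
        strand ++ ['G']
      else if c.getD i 0 ≥ a.getD i 0 ∧ c.getD i 0 ≥ t.getD i 0 then
        strand ++ ['C']
      else if a.getD i 0 ≥ t.getD i 0 then
        strand ++ ['A']
      else
        strand ++ ['T']) acc
    = acc ++ (List.range n).map (pvCasc g c a t) := by
  induction n generalizing acc with
  | zero => simp
  | succ m ih =>
    rw [List.range_succ, List.foldl_append, ih, List.map_append]
    simp only [List.foldl_cons, List.foldl_nil, List.map_cons, List.map_nil, pvCasc]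
    split_ifs <;> simp

lemma pass_length (P : Nat → Bool) (v : Char) (n : Nat) (s : List Char) :
    (pvPass P v n s).length = s.length := by
  unfold pvPass
  induction n with
  | zero => simp
  | succ m ih =>
    rw [List.range_succ, List.foldl_append]
    simp only [List.foldl_cons, List.foldl_nil]
    split_ifs <;> simp [ih]

-- value at j after one pass: overwritten iff j < n and P j holds
lemma pass_getD (P : Nat → Bool) (v : Char) (n : Nat) (s : List Char) (j : Nat) (d : Char)
    (hj : j < s.length) :
    (pvPass P v n s).getD j d = if j < n ∧ P j then v else s.getD j d := by
  unfold pvPass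
  induction n with
  | zero => simp
  | succ m ih =>
    rw [List.range_succ, List.foldl_append]
    simp only [List.foldl_cons, List.foldl_nil]
    have hlen : ((List.range m).foldl (fun l i => if P i then l.set i v else l) s).length = s.length := by
      have := pass_length P v m s; simpa [pvPass] using this
    by_cases hP : P m
    · simp only [hP, if_true]
      rcases Nat.lt_trichotomy j m with hlt | rfl | hgt
      · rw [List.getD_eq_getElem?_getD, List.getElem?_set_ne (by omega), ← List.getD_eq_getElem?_getD, ih]
        by_cases hpj : P j = true <;> simp [hlt, Nat.lt_succ_of_lt hlt, hpj]
      · rw [List.getD_eq_getElem?_getD, List.getElem?_set_self (by omega)]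
        simp [hP]
      · rw [List.getD_eq_getElem?_getD, List.getElem?_set_ne (by omega), ← List.getD_eq_getElem?_getD, ih]
        have h1 : ¬ (j < m ∧ P j = true) := by omega
        have h2 : ¬ (j < m + 1 ∧ P j = true) := by omega
        simp only [h1, h2, if_false]
    · rw [if_neg (by simp [hP]), ih]
      have hiff : (j < m + 1 ∧ P j = true) ↔ (j < m ∧ P j = true) := by
        constructor
        · rintro ⟨hl, hp⟩
          rcases Nat.lt_succ_iff_lt_or_eq.mp hl with h | rfl
          · exact ⟨h, hp⟩
          · exact absurd hp hP
        · rintro ⟨hl, hp⟩; exact ⟨Nat.lt_succ_of_lt hl, hp⟩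
      simp only [hiff]

-- B's three passes land on the cascade letters
lemma b_eq (g c a t : List Int) :
    con_string_alt g c a t = String.mk ((List.range g.length).map (pvCasc g c a t)) := by
  unfold con_string_alt
  congr 1
  set n := g.length with hn
  clear_value n
  apply List.ext_getElem
  · simp [pass_length]
  · intro j h1 h2
    have hj1 : j < n := by simpa [pass_length] using h1
    have l2 : (pvPass (fun i => decide (a.getD i 0 ≥ t.getD i 0)) 'A' n (List.replicate n 'T')).length = n := by
      simp [pass_length]
    have l3 : (pvPass (fun i => decide (c.getD i 0 ≥ a.getD i 0 ∧ c.getD i 0 ≥ t.getD i 0)) 'C' n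
        (pvPass (fun i => decide (a.getD i 0 ≥ t.getD i 0)) 'A' n (List.replicate n 'T'))).length = n := by
      simp [pass_length]
    rw [← List.getD_eq_getElem _ '?' h1, ← List.getD_eq_getElem _ '?' h2]
    rw [pass_getD _ _ _ _ _ _ (by rw [l3]; exact hj1),
        pass_getD _ _ _ _ _ _ (by rw [l2]; exact hj1),
        pass_getD _ _ _ _ _ _ (by simpa using hj1)]
    simp only [pvCasc, List.getD_eq_getElem?_getD, List.getElem?_map, List.getElem?_range hj1,
      Option.map_some, Option.getD_some, List.getElem?_replicate, if_pos hj1,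
      decide_eq_true_eq]
    split_ifs <;> first | rfl | omega

-- ===== VERDICT (by name: the statement is the Claim_ definition above) =====
theorem con_string_spec : Claim_equal_con_string := by
  intro g c a t _hd _hpre
  unfold Spec_con_string con_string
  rw [a_loop_eq, b_eq]
  simp
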